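-- pv_equiv track=rewrite | github.com/jibanCat/hcd_priya | hcd_analysis/dla_truth.py | _merge_close_runs
-- ===== SOURCE A (Python) =====
-- from typing import Dict, Iterable, List, Optional, Sequence, Tuple
--
-- def _merge_close_runs(
--     runs: List[Tuple[int, int]],
--     merge_gap_pixels: int,
-- ) -> List[Tuple[int, int]]:
--     """Merge consecutive runs whose pixel gap ≤ merge_gap_pixels."""
--     if not runs:
--         return runs
--     merged = [runs[0]]
--     for s, e in runs[1:]:
--         prev_s, prev_e = merged[-1]
--         gap = s - prev_e - 1
--         if gap <= merge_gap_pixels: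
--             merged[-1] = (prev_s, e)
--         else:
--             merged.append((s, e))
--     return merged
-- ===== SOURCE B (Python) =====
-- from typing import Dict, Iterable, List, Optional, Sequence, Tuple
--
-- def _merge_close_runs(
--     runs: List[Tuple[int, int]],
--     merge_gap_pixels: int,
-- ) -> List[Tuple[int, int]]:
--     """Two-pointer group scan: find the whole close-gap group, emit it once."""
--     out = []
--     i = 0
--     n = len(runs)
--     while i < n:
--         j = i + 1
--         while j < n and runs[j][0] - runs[j - 1][1] - 1 <= merge_gap_pixels:
--             j += 1
--         out.append((runs[i][0], runs[j - 1][1]))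
--         i = j
--     return out
-- ===== Notes on version B (the rewrite author's own statement) =====
-- stated objective: alternative
-- what changed: Replaces A's accumulator that mutates its last tuple on every close run with a two-pointer scan that first finds the whole close-gap group and then emits (group start, group end) once per group.
import Mathlib
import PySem

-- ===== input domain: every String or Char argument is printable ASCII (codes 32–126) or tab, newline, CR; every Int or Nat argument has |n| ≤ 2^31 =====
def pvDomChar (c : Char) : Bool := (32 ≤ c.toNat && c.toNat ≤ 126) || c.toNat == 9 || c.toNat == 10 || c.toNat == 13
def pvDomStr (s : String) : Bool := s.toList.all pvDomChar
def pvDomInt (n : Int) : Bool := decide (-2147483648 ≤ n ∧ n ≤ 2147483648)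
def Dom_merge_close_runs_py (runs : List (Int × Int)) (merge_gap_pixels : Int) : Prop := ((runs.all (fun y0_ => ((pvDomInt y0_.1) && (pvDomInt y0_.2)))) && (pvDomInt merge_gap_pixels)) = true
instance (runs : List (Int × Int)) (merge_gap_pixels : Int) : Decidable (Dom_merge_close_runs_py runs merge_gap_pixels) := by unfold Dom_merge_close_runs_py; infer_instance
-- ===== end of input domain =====

-- B replaces A's mutate-last-tuple accumulator with a two-pointer group scan (same cost, different decomposition).


-- ===== PORT A =====
-- one step of A's for-loop: merged[-1] inspected, replaced or appended
def aStep (g : Int) (merged : List (Int × Int)) (se : Int × Int) : List (Int × Int) :=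
  match merged.getLast? with
  | some prev =>
      if se.1 - prev.2 - 1 ≤ g then merged.dropLast ++ [(prev.1, se.2)]
      else merged ++ [se]
  | none => merged ++ [se]  -- unreachable: merged starts nonempty and stays nonempty

def merge_close_runs_py (runs : List (Int × Int)) (merge_gap_pixels : Int) : List (Int × Int) :=
  match runs with
  | [] => []
  | r :: rest => rest.foldl (aStep merge_gap_pixels) [r]

-- ===== PORT B =====
-- inner while loop of Source B: how many further runs belong to the current group
def spanLen (g : Int) (prev : Int × Int) : List (Int × Int) → Nat
  | [] => 0
  | r :: rest => if r.1 - prev.2 - 1 ≤ g then spanLen g r rest + 1 else 0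

-- outer while loop of Source B: each iteration consumes one whole group and emits one pair
def merge_close_runs_py_alt (runs : List (Int × Int)) (merge_gap_pixels : Int) : List (Int × Int) :=
  match runs with
  | [] => []
  | r :: rest =>
      let m := spanLen merge_gap_pixels r rest
      (r.1, ((rest.take m).getLastD r).2) :: merge_close_runs_py_alt (rest.drop m) merge_gap_pixels
termination_by runs.length
decreasing_by simp

-- ===== PRECONDITION & SPEC =====
def Spec_merge_close_runs_py (runs : List (Int × Int)) (merge_gap_pixels : Int) (out : List (Int × Int)) : Prop := out = merge_close_runs_py_alt runs merge_gap_pixels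
instance (runs : List (Int × Int)) (merge_gap_pixels : Int) (out : List (Int × Int)) : Decidable (Spec_merge_close_runs_py runs merge_gap_pixels out) := by unfold Spec_merge_close_runs_py; infer_instance

-- ===== CLAIM (what is proved, stated in full; the proofs are below) =====
def Claim_equal_merge_close_runs_py : Prop := ∀ (runs : List (Int × Int)) (merge_gap_pixels : Int), Dom_merge_close_runs_py runs merge_gap_pixels → Spec_merge_close_runs_py runs merge_gap_pixels (merge_close_runs_py runs merge_gap_pixels)

-- ===== LEMMAS AND PROOFS =====

-- fused one-group-at-a-time recursion, intermediate between A's fold and B's scan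
def Hm (g : Int) : (Int × Int) → List (Int × Int) → List (Int × Int)
  | cur, [] => [cur]
  | cur, r :: rest => if r.1 - cur.2 - 1 ≤ g then Hm g (cur.1, r.2) rest else cur :: Hm g r rest

theorem spanLen_congr (g : Int) (l : List (Int × Int)) (a b : Int × Int) (h : a.2 = b.2) :
    spanLen g a l = spanLen g b l := by
  cases l <;> simp [spanLen, h]

theorem getLastD_snd_congr (l : List (Int × Int)) (a b : Int × Int) (h : a.2 = b.2) :
    (l.getLastD a).2 = (l.getLastD b).2 := by
  cases l with
  | nil => simpa using h
  | cons x xs =>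
    simp [List.getLastD]

theorem alt_nil (g : Int) : merge_close_runs_py_alt [] g = [] := by
  rw [merge_close_runs_py_alt]

theorem alt_cons (g : Int) (r : Int × Int) (rest : List (Int × Int)) :
    merge_close_runs_py_alt (r :: rest) g
      = (r.1, ((rest.take (spanLen g r rest)).getLastD r).2)
        :: merge_close_runs_py_alt (rest.drop (spanLen g r rest)) g := by
  rw [merge_close_runs_py_alt]

theorem foldl_aStep (g : Int) (rest : List (Int × Int)) :
    ∀ done cur, rest.foldl (aStep g) (done ++ [cur]) = done ++ Hm g cur rest := by
  induction rest with
  | nil => intro done cur; simp [Hm]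
  | cons r rest ih =>
    intro done cur
    simp only [List.foldl_cons, aStep, List.getLast?_concat, List.dropLast_concat, Hm]
    by_cases h : r.1 - cur.2 - 1 ≤ g
    · simp [h, ih]
    · have := ih (done ++ [cur]) r
      simp only [List.append_assoc, List.cons_append, List.nil_append] at this
      simpa [h] using this

theorem Hm_eq_alt (g : Int) (rest : List (Int × Int)) :
    ∀ cur, Hm g cur rest = merge_close_runs_py_alt (cur :: rest) g := by
  induction rest with
  | nil => intro cur; simp [Hm, alt_cons, alt_nil, spanLen]
  | cons r rest ih =>
    intro cur
    by_cases h : r.1 - cur.2 - 1 ≤ g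
    · have hs : spanLen g (cur.1, r.2) rest = spanLen g r rest :=
        spanLen_congr g rest (cur.1, r.2) r rfl
      have hL : ((rest.take (spanLen g r rest)).getLastD (cur.1, r.2)).2
          = ((rest.take (spanLen g r rest)).getLastD r).2 :=
        getLastD_snd_congr _ (cur.1, r.2) r rfl
      rw [Hm, if_pos h, ih (cur.1, r.2)]
      rw [alt_cons, alt_cons]
      simp only [spanLen, if_pos h, hs, List.take_succ_cons, List.drop_succ_cons,
        List.getLastD_cons, hL]
    · rw [Hm, if_neg h, ih r, alt_cons g cur (r :: rest)]
      simp [spanLen, h]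

-- ===== VERDICT (by name: the statement is the Claim_ definition above) =====
theorem merge_close_runs_py_spec : Claim_equal_merge_close_runs_py := by
  intro runs g _
  unfold Spec_merge_close_runs_py
  cases runs with
  | nil => exact (alt_nil g).symm
  | cons r rest =>
    have := foldl_aStep g rest [] r
    simp only [List.nil_append] at this
    rw [merge_close_runs_py, this, Hm_eq_alt]
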